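-- pv_equiv track=rewrite | github.com/mhwood/downscale_greenland | L2/utils/init_file_creation_hourly/create_L3_daily_exf_files_from_L1_input_faces.py | create_annual_list_of_files
-- ===== SOURCE A (Python) =====
-- def create_annual_list_of_files(year,var_name):
--     if year % 4 == 0:
--         n_days = 366
--     else:
--         n_days = 365
--
--     day = 0
--     month = 1
--
--     output_files = []
--     start_indices = []
--     end_indices = []
--
--     for d in range(n_days):
--         day+=1
--         if var_name not in ['UWIND','VWIND']:
--             output_file = 'L3_exf_'+var_name+'_'+str(year)+'{:02d}'.format(month)+'{:02d}'.format(day)+'.bin'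
--         else:
--             output_file = 'L3_exf_' + var_name + '_' + str(year) + '{:02d}'.format(month) + '{:02d}'.format(day) + '_rotated.bin'
--         output_files.append(output_file)
--         start_indices.append(d*4)
--         end_indices.append((d+1)*4)
--
--         if month in [1,3,5,7,8,10,12]:
--             if day==31:
--                 day = 0
--                 month += 1
--         elif month in [4,6,9,11]:
--             if day == 30:
--                 day = 0
--                 month += 1
--         else:
--             if year%4==0:
--                 if day==29:
--                     day = 0
--                     month += 1
--             else:
--                 if day==28:
--                     day = 0
--                     month += 1
--
--     return(output_files,start_indices,end_indices)
-- ===== SOURCE B (Python) =====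
-- def create_annual_list_of_files(year, var_name):
--     month_lengths = [31, 29 if year % 4 == 0 else 28, 31, 30, 31, 30, 31, 31, 30, 31, 30, 31]
--     suffix = '_rotated.bin' if var_name in ['UWIND', 'VWIND'] else '.bin'
--
--     output_files = []
--     start_indices = []
--     end_indices = []
--
--     d = 0
--     for month in range(1, 13):
--         for day in range(1, month_lengths[month - 1] + 1):
--             output_files.append('L3_exf_' + var_name + '_' + str(year)
--                                 + '{:02d}'.format(month) + '{:02d}'.format(day) + suffix)
--             start_indices.append(d * 4)
--             end_indices.append((d + 1) * 4)
--             d += 1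
--
--     return (output_files, start_indices, end_indices)
-- ===== Notes on version B (the rewrite author's own statement) =====
-- stated objective: simpler
-- what changed: A's single 365/366-iteration loop with a hand-rolled day/month rollover state machine is replaced by a month-lengths table with nested month/day loops and a running day counter (keeping A's year%4 leap rule and exact formatting).
import Mathlib
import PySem

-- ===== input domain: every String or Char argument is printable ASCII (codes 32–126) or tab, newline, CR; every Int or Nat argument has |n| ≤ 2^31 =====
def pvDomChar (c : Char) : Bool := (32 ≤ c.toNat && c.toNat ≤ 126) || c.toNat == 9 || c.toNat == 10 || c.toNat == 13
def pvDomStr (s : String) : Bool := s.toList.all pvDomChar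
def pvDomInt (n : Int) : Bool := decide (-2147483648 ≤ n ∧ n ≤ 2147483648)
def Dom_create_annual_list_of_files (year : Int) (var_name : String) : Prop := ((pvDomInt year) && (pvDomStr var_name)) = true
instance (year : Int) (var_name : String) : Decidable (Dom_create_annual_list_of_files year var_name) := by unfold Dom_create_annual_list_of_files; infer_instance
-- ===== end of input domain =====

-- B replaces A's hand-rolled day/month rollover state machine by a month-lengths table with
-- nested month/day loops and a running day counter (simpler decomposition, same exact output).

-- ===== PORT A =====
-- '{:02d}'.format(n): zero-pad to width 2; exact for every n whose str has ≥ 1 character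
-- after a possible sign (only month 1..12 / day 1..31 reach it here).
def pvFmt02 (n : Int) : String :=
  if (PySem.Int.toChars n).length < 2 then "0" ++ PySem.Int.toStr n else PySem.Int.toStr n

-- one iteration of A's 'for d in range(n_days)' loop; state = (day, month, output_files, start_indices, end_indices)
def pvStepA (year : Int) (var_name : String)
    (st : Int × Int × List String × List Int × List Int) (d : Int) :
    Int × Int × List String × List Int × List Int :=
  let day := st.1 + 1
  let month := st.2.1
  let output_file :=
    if var_name ∉ (["UWIND", "VWIND"] : List String) then
      "L3_exf_" ++ var_name ++ "_" ++ PySem.Int.toStr year ++ pvFmt02 month ++ pvFmt02 day ++ ".bin"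
    else
      "L3_exf_" ++ var_name ++ "_" ++ PySem.Int.toStr year ++ pvFmt02 month ++ pvFmt02 day ++ "_rotated.bin"
  let output_files := st.2.2.1 ++ [output_file]
  let start_indices := st.2.2.2.1 ++ [d * 4]
  let end_indices := st.2.2.2.2 ++ [(d + 1) * 4]
  let dm : Int × Int :=
    if month ∈ ([1, 3, 5, 7, 8, 10, 12] : List Int) then
      if day == 31 then (0, month + 1) else (day, month)
    else if month ∈ ([4, 6, 9, 11] : List Int) then
      if day == 30 then (0, month + 1) else (day, month)
    else if year % 4 == 0 then
      if day == 29 then (0, month + 1) else (day, month)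
    else
      if day == 28 then (0, month + 1) else (day, month)
  (dm.1, dm.2, output_files, start_indices, end_indices)

def create_annual_list_of_files (year : Int) (var_name : String) : List String × List Int × List Int :=
  let n_days : Int := if year % 4 == 0 then 366 else 365
  let r := (PySem.List.pyRange 0 n_days 1).foldl (pvStepA year var_name) (0, 1, [], [], [])
  (r.2.2.1, r.2.2.2.1, r.2.2.2.2)

-- ===== PORT B =====
def pvMonthLengths (year : Int) : List Int :=
  [31, if year % 4 == 0 then 29 else 28, 31, 30, 31, 30, 31, 31, 30, 31, 30, 31]

def pvSfx (var_name : String) : String :=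
  if var_name ∈ (["UWIND", "VWIND"] : List String) then "_rotated.bin" else ".bin"

def pvFname (year : Int) (var_name suffix : String) (month day : Int) : String :=
  "L3_exf_" ++ var_name ++ "_" ++ PySem.Int.toStr year ++ pvFmt02 month ++ pvFmt02 day ++ suffix

-- B's inner day loop body; state = (output_files, start_indices, end_indices, d)
def pvStepBDay (year : Int) (var_name suffix : String) (month : Int)
    (st : List String × List Int × List Int × Int) (day : Int) :
    List String × List Int × List Int × Int :=
  (st.1 ++ [pvFname year var_name suffix month day],
   st.2.1 ++ [st.2.2.2 * 4],
   st.2.2.1 ++ [(st.2.2.2 + 1) * 4],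
   st.2.2.2 + 1)

-- B's outer month loop body: 'for day in range(1, month_lengths[month-1]+1)'
-- (month ranges over 1..12 so the index is always in range; the .getD 0 is never taken)
def pvStepBMonth (year : Int) (var_name suffix : String)
    (st : List String × List Int × List Int × Int) (month : Int) :
    List String × List Int × List Int × Int :=
  let len := (PySem.List.pyGet? (pvMonthLengths year) (month - 1)).getD 0
  (PySem.List.pyRange 1 (len + 1) 1).foldl (pvStepBDay year var_name suffix month) st

def create_annual_list_of_files_alt (year : Int) (var_name : String) : List String × List Int × List Int :=
  let suffix := pvSfx var_name
  let r := (PySem.List.pyRange 1 13 1).foldl (pvStepBMonth year var_name suffix) ([], [], [], 0)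
  (r.1, r.2.1, r.2.2.1)

-- ===== PRECONDITION & SPEC =====
def Spec_create_annual_list_of_files (year : Int) (var_name : String) (out : List String × List Int × List Int) : Prop := out = create_annual_list_of_files_alt year var_name
instance (year : Int) (var_name : String) (out : List String × List Int × List Int) : Decidable (Spec_create_annual_list_of_files year var_name out) := by unfold Spec_create_annual_list_of_files; infer_instance

-- ===== CLAIM (what is proved, stated in full; the proofs are below) =====
def Claim_equal_create_annual_list_of_files : Prop := ∀ (year : Int) (var_name : String), Dom_create_annual_list_of_files year var_name → Spec_create_annual_list_of_files year var_name (create_annual_list_of_files year var_name)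

-- ===== LEMMAS AND PROOFS =====

-- A's rollover, extracted as a pure (day, month) transition
def pvRoll (leap : Bool) (day month : Int) : Int × Int :=
  if month ∈ ([1, 3, 5, 7, 8, 10, 12] : List Int) then
    if day == 31 then (0, month + 1) else (day, month)
  else if month ∈ ([4, 6, 9, 11] : List Int) then
    if day == 30 then (0, month + 1) else (day, month)
  else if leap then
    if day == 29 then (0, month + 1) else (day, month)
  else
    if day == 28 then (0, month + 1) else (day, month)

-- the (month, day) pairs A's loop emits, and its final state
def pvRun (leap : Bool) : Nat → Int × Int → List (Int × Int)
  | 0, _ => []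
  | n + 1, st => (st.2, st.1 + 1) :: pvRun leap n (pvRoll leap (st.1 + 1) st.2)

def pvIter (leap : Bool) : Nat → Int × Int → Int × Int
  | 0, st => st
  | n + 1, st => pvIter leap n (pvRoll leap (st.1 + 1) st.2)

-- the (month, day) pairs B's nested loops visit
def pvMD (leap : Bool) : List (Int × Int) :=
  ([(1, 31), (2, if leap then 29 else 28), (3, 31), (4, 30), (5, 31), (6, 30),
    (7, 31), (8, 31), (9, 30), (10, 31), (11, 30), (12, 31)] : List (Int × Int)).flatMap
    (fun ml => (PySem.List.pyRange 1 (ml.2 + 1) 1).map (fun d => (ml.1, d)))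

lemma pvStepA_eq (year : Int) (v : String) (day month : Int) (f : List String) (s e : List Int) (d : Int) :
    pvStepA year v (day, month, f, s, e) d =
      ((pvRoll (year % 4 == 0) (day + 1) month).1, (pvRoll (year % 4 == 0) (day + 1) month).2,
       f ++ [pvFname year v (pvSfx v) month (day + 1)], s ++ [d * 4], e ++ [(d + 1) * 4]) := by
  by_cases h : v ∈ (["UWIND", "VWIND"] : List String) <;>
    simp [pvStepA, pvRoll, pvFname, pvSfx, h]

lemma pvA_loop (year : Int) (v : String) (l : List Int) : ∀ (day month : Int) (f : List String) (s e : List Int),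
    l.foldl (pvStepA year v) (day, month, f, s, e)
      = ((pvIter (year % 4 == 0) l.length (day, month)).1,
         (pvIter (year % 4 == 0) l.length (day, month)).2,
         f ++ (pvRun (year % 4 == 0) l.length (day, month)).map (fun p => pvFname year v (pvSfx v) p.1 p.2),
         s ++ l.map (fun i => i * 4),
         e ++ l.map (fun i => (i + 1) * 4)) := by
  induction l with
  | nil => intro day month f s e; simp [pvRun, pvIter]
  | cons a l ih =>
    intro day month f s e
    simp only [List.foldl_cons, pvStepA_eq, List.length_cons]
    rw [ih]
    simp [pvRun, pvIter, List.append_assoc]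

lemma pvB_inner (year : Int) (v sfx : String) (m : Int) (l : List Int) :
    ∀ (f : List String) (s e : List Int) (d : Int),
    l.foldl (pvStepBDay year v sfx m) (f, s, e, d)
      = (f ++ l.map (fun day => pvFname year v sfx m day),
         s ++ (List.range l.length).map (fun (i : Nat) => (d + (i : Int)) * 4),
         e ++ (List.range l.length).map (fun (i : Nat) => (d + (i : Int) + 1) * 4),
         d + l.length) := by
  induction l with
  | nil => intro f s e d; simp
  | cons a l ih =>
    intro f s e d
    have hs : (List.range (l.length + 1)).map (fun (i : Nat) => (d + (i : Int)) * 4)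
        = d * 4 :: (List.range l.length).map (fun (i : Nat) => (d + 1 + (i : Int)) * 4) := by
      rw [List.range_succ_eq_map, List.map_cons, List.map_map]
      refine congrArg₂ List.cons (by push_cast; ring) ?_
      refine List.map_congr_left (fun x _ => ?_)
      simp only [Function.comp]; push_cast; ring
    have he : (List.range (l.length + 1)).map (fun (i : Nat) => (d + (i : Int) + 1) * 4)
        = (d + 1) * 4 :: (List.range l.length).map (fun (i : Nat) => (d + 1 + (i : Int) + 1) * 4) := by
      rw [List.range_succ_eq_map, List.map_cons, List.map_map]
      refine congrArg₂ List.cons (by push_cast; ring) ?_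
      refine List.map_congr_left (fun x _ => ?_)
      simp only [Function.comp]; push_cast; ring
    simp only [List.foldl_cons, pvStepBDay, List.length_cons, List.map_cons, hs, he]
    rw [ih]
    simp only [List.append_assoc, List.singleton_append, Prod.mk.injEq]
    exact ⟨trivial, trivial, trivial, by push_cast; ring⟩

-- ===== VERDICT (by name: the statement is the Claim_ definition above) =====
set_option maxRecDepth 100000 in
theorem create_annual_list_of_files_spec : Claim_equal_create_annual_list_of_files := by
  intro year v _
  unfold Spec_create_annual_list_of_files create_annual_list_of_files create_annual_list_of_files_alt
  cases hleap : (year % 4 == 0)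
  case false =>
    simp only [Bool.false_eq_true, reduceIte]
    rw [show PySem.List.pyRange 1 13 1 = [1,2,3,4,5,6,7,8,9,10,11,12] from by decide]
    simp only [List.foldl_cons, List.foldl_nil, pvStepBMonth,
      show pvMonthLengths year = ([31,28,31,30,31,30,31,31,30,31,30,31] : List Int) from by
        simp [pvMonthLengths, hleap]]
    rw [show ((PySem.List.pyGet? ([31,28,31,30,31,30,31,31,30,31,30,31] : List Int) ((1:Int)-1)).getD 0 + 1 : Int) = 32 from by decide,
        show ((PySem.List.pyGet? ([31,28,31,30,31,30,31,31,30,31,30,31] : List Int) ((2:Int)-1)).getD 0 + 1 : Int) = 29 from by decide,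
        show ((PySem.List.pyGet? ([31,28,31,30,31,30,31,31,30,31,30,31] : List Int) ((3:Int)-1)).getD 0 + 1 : Int) = 32 from by decide,
        show ((PySem.List.pyGet? ([31,28,31,30,31,30,31,31,30,31,30,31] : List Int) ((4:Int)-1)).getD 0 + 1 : Int) = 31 from by decide,
        show ((PySem.List.pyGet? ([31,28,31,30,31,30,31,31,30,31,30,31] : List Int) ((5:Int)-1)).getD 0 + 1 : Int) = 32 from by decide,
        show ((PySem.List.pyGet? ([31,28,31,30,31,30,31,31,30,31,30,31] : List Int) ((6:Int)-1)).getD 0 + 1 : Int) = 31 from by decide,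
        show ((PySem.List.pyGet? ([31,28,31,30,31,30,31,31,30,31,30,31] : List Int) ((7:Int)-1)).getD 0 + 1 : Int) = 32 from by decide,
        show ((PySem.List.pyGet? ([31,28,31,30,31,30,31,31,30,31,30,31] : List Int) ((8:Int)-1)).getD 0 + 1 : Int) = 32 from by decide,
        show ((PySem.List.pyGet? ([31,28,31,30,31,30,31,31,30,31,30,31] : List Int) ((9:Int)-1)).getD 0 + 1 : Int) = 31 from by decide,
        show ((PySem.List.pyGet? ([31,28,31,30,31,30,31,31,30,31,30,31] : List Int) ((10:Int)-1)).getD 0 + 1 : Int) = 32 from by decide,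
        show ((PySem.List.pyGet? ([31,28,31,30,31,30,31,31,30,31,30,31] : List Int) ((11:Int)-1)).getD 0 + 1 : Int) = 31 from by decide,
        show ((PySem.List.pyGet? ([31,28,31,30,31,30,31,31,30,31,30,31] : List Int) ((12:Int)-1)).getD 0 + 1 : Int) = 32 from by decide]
    simp only [pvB_inner]
    rw [pvA_loop]
    simp only [hleap, PySem.List.length_pyRange_one]
    norm_num
    refine ⟨?_, ?_, ?_⟩
    · rw [show pvRun false (Int.toNat 365) (0, 1) = pvMD false from by decide]
      simp only [pvMD, List.flatMap_cons, List.flatMap_nil, List.map_append, List.map_map,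
        Function.comp_def, List.append_nil]
      norm_num
    · decide
    · decide
  case true =>
    simp only [reduceIte]
    rw [show PySem.List.pyRange 1 13 1 = [1,2,3,4,5,6,7,8,9,10,11,12] from by decide]
    simp only [List.foldl_cons, List.foldl_nil, pvStepBMonth,
      show pvMonthLengths year = ([31,29,31,30,31,30,31,31,30,31,30,31] : List Int) from by
        simp [pvMonthLengths, hleap]]
    rw [show ((PySem.List.pyGet? ([31,29,31,30,31,30,31,31,30,31,30,31] : List Int) ((1:Int)-1)).getD 0 + 1 : Int) = 32 from by decide,
        show ((PySem.List.pyGet? ([31,29,31,30,31,30,31,31,30,31,30,31] : List Int) ((2:Int)-1)).getD 0 + 1 : Int) = 30 from by decide,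
        show ((PySem.List.pyGet? ([31,29,31,30,31,30,31,31,30,31,30,31] : List Int) ((3:Int)-1)).getD 0 + 1 : Int) = 32 from by decide,
        show ((PySem.List.pyGet? ([31,29,31,30,31,30,31,31,30,31,30,31] : List Int) ((4:Int)-1)).getD 0 + 1 : Int) = 31 from by decide,
        show ((PySem.List.pyGet? ([31,29,31,30,31,30,31,31,30,31,30,31] : List Int) ((5:Int)-1)).getD 0 + 1 : Int) = 32 from by decide,
        show ((PySem.List.pyGet? ([31,29,31,30,31,30,31,31,30,31,30,31] : List Int) ((6:Int)-1)).getD 0 + 1 : Int) = 31 from by decide,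
        show ((PySem.List.pyGet? ([31,29,31,30,31,30,31,31,30,31,30,31] : List Int) ((7:Int)-1)).getD 0 + 1 : Int) = 32 from by decide,
        show ((PySem.List.pyGet? ([31,29,31,30,31,30,31,31,30,31,30,31] : List Int) ((8:Int)-1)).getD 0 + 1 : Int) = 32 from by decide,
        show ((PySem.List.pyGet? ([31,29,31,30,31,30,31,31,30,31,30,31] : List Int) ((9:Int)-1)).getD 0 + 1 : Int) = 31 from by decide,
        show ((PySem.List.pyGet? ([31,29,31,30,31,30,31,31,30,31,30,31] : List Int) ((10:Int)-1)).getD 0 + 1 : Int) = 32 from by decide,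
        show ((PySem.List.pyGet? ([31,29,31,30,31,30,31,31,30,31,30,31] : List Int) ((11:Int)-1)).getD 0 + 1 : Int) = 31 from by decide,
        show ((PySem.List.pyGet? ([31,29,31,30,31,30,31,31,30,31,30,31] : List Int) ((12:Int)-1)).getD 0 + 1 : Int) = 32 from by decide]
    simp only [pvB_inner]
    rw [pvA_loop]
    simp only [hleap, PySem.List.length_pyRange_one]
    norm_num
    refine ⟨?_, ?_, ?_⟩
    · rw [show pvRun true (Int.toNat 366) (0, 1) = pvMD true from by decide]
      simp only [pvMD, List.flatMap_cons, List.flatMap_nil, List.map_append, List.map_map,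
        Function.comp_def, List.append_nil]
      norm_num
    · decide
    · decide
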